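-- pv_equiv track=rewrite | github.com/ruppysuppy/Daily-Coding-Problem-Solutions | Solutions/259.py | get_winning_letters
-- ===== SOURCE A (Python) =====
-- from typing import List, Set
--
-- def get_winning_letters(words: List[str]) -> Set[str]:
--     # requirements for winning start letter:
--     # - the length is even for all words starting with the character
--     starting_char_freq = {}
--     for word in words:
--         if word[0] not in starting_char_freq:
--             starting_char_freq[word[0]] = []
--         starting_char_freq[word[0]].append(word)
--
--     winning_start_letters = set()
--     for starting_char in starting_char_freq:
--         for word in starting_char_freq[starting_char]:
--             if len(word) % 2 != 0:
--                 break
--         else: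
--             winning_start_letters.add(starting_char)
--     return winning_start_letters
-- ===== SOURCE B (Python) =====
-- from typing import List, Set
--
-- def get_winning_letters(words: List[str]) -> Set[str]:
--     # One pass: per first letter, keep a single boolean "all words seen so far are even-length".
--     flags = {}
--     for word in words:
--         c = word[0]
--         even = len(word) % 2 == 0
--         flags[c] = flags.get(c, True) and even
--     return {c for c, ok in flags.items() if ok}
-- ===== Notes on version B (the rewrite author's own statement) =====
-- stated objective: simpler
-- what changed: Single pass keeping one boolean flag per first letter (AND of even-length), instead of grouping all words into per-letter lists and re-scanning each group with a for/else loop.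
import Mathlib
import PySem

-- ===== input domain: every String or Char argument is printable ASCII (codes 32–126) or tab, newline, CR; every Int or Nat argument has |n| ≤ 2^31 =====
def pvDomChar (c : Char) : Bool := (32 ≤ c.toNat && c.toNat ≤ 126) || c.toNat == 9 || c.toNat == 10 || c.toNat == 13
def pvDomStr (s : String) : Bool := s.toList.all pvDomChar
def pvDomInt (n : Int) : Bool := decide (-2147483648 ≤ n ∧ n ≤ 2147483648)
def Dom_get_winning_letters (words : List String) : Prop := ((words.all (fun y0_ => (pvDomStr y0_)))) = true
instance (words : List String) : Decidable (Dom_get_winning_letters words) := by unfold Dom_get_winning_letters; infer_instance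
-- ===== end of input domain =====

-- B replaces A's per-letter word lists + inner for/else rescan by a single pass keeping one
-- boolean flag per first letter (objective: simpler; same asymptotic cost).


-- ===== PORT A =====
-- word[0] (a one-character string in Python; kept as the Char here, wrapped back into a
-- one-character String for the result set). none = IndexError on the empty string, excluded by Pre_.
def pvFirst (w : String) : Char := (PySem.Str.pyGet? w 0).getD ' '

-- A's inner 'for word in …: if len(word) % 2 != 0: break / else: add' loop, literally.
def pvAllEvenLoop : List String → Bool
  | [] => true
  | w :: ws => if PySem.Int.mod (PySem.Str.len w) 2 ≠ 0 then false else pvAllEvenLoop ws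

def get_winning_letters (words : List String) : List String :=
  let freq : PySem.Dict Char (List String) :=
    words.foldl (fun d word =>
      let d := if d.contains (pvFirst word) then d else d.insert (pvFirst word) ([] : List String)
      d.modify (pvFirst word) [] (fun ws => ws ++ [word])) PySem.Dict.empty
  freq.keys.foldl (fun s c =>
    if pvAllEvenLoop (freq.getD c []) then PySem.Set.add s (String.ofList [c]) else s)
    ([] : PySem.Set String)

-- ===== PORT B =====
def get_winning_letters_alt (words : List String) : List String :=
  let flags : PySem.Dict Char Bool :=
    words.foldl (fun d word =>
      d.insert (pvFirst word)
        (d.getD (pvFirst word) true && (PySem.Int.mod (PySem.Str.len word) 2 == 0)))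
      PySem.Dict.empty
  flags.items.foldl (fun s p => if p.2 then PySem.Set.add s (String.ofList [p.1]) else s)
    ([] : PySem.Set String)

-- ===== PRECONDITION & SPEC =====
-- Pre_ excludes lists containing an empty string, on which A (and B) raise IndexError at word[0].
def Pre_get_winning_letters (words : List String) : Prop := ∀ w ∈ words, w ≠ ""
instance (words : List String) : Decidable (Pre_get_winning_letters words) := by
  unfold Pre_get_winning_letters; infer_instance
def pvWitness_get_winning_letters : List String := ["ab", "abc", "cd", "a"]

def Spec_get_winning_letters (words : List String) (out : List String) : Prop := out = get_winning_letters_alt words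
instance (words : List String) (out : List String) : Decidable (Spec_get_winning_letters words out) := by unfold Spec_get_winning_letters; infer_instance

-- ===== CLAIM (what is proved, stated in full; the proofs are below) =====
def Claim_equal_get_winning_letters : Prop := ∀ (words : List String), Dom_get_winning_letters words → Pre_get_winning_letters words → Spec_get_winning_letters words (get_winning_letters words)

-- ===== LEMMAS AND PROOFS =====

-- A's dict-building step and B's dict-building step, named for the invariant proof.
def pvStepA (d : PySem.Dict Char (List String)) (word : String) : PySem.Dict Char (List String) :=
  let d := if d.contains (pvFirst word) then d else d.insert (pvFirst word) ([] : List String)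
  d.modify (pvFirst word) [] (fun ws => ws ++ [word])

def pvStepB (d : PySem.Dict Char Bool) (word : String) : PySem.Dict Char Bool :=
  d.insert (pvFirst word)
    (d.getD (pvFirst word) true && (PySem.Int.mod (PySem.Str.len word) 2 == 0))

lemma pvAllEvenLoop_append (xs : List String) (w : String) :
    pvAllEvenLoop (xs ++ [w]) = (pvAllEvenLoop xs && (PySem.Int.mod (PySem.Str.len w) 2 == 0)) := by
  induction xs with
  | nil =>
    simp only [List.nil_append, pvAllEvenLoop]
    have h : (w.length : Int) % 2 = 0 ∨ (w.length : Int) % 2 = 1 := by omega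
    rcases h with h | h <;> simp [h]
  | cons x xs ih =>
    simp [List.cons_append, pvAllEvenLoop, ih, Bool.and_assoc]

-- The loop invariant: along the two folds, the dicts have the same keys (in the same order),
-- B's keys stay nodup, and B's flag at each letter is A's inner for/else verdict on its list.
lemma pvInvariant (words : List String) :
    ∀ (dA : PySem.Dict Char (List String)) (dB : PySem.Dict Char Bool),
      dA.keys = dB.keys → dB.keys.Nodup →
      (∀ c, dB.getD c true = pvAllEvenLoop (dA.getD c [])) →
      (words.foldl pvStepA dA).keys = (words.foldl pvStepB dB).keys ∧
      (words.foldl pvStepB dB).keys.Nodup ∧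
      (∀ c, (words.foldl pvStepB dB).getD c true
          = pvAllEvenLoop ((words.foldl pvStepA dA).getD c [])) := by
  induction words with
  | nil => intro dA dB hk hnd hv; exact ⟨hk, hnd, hv⟩
  | cons w ws ih =>
    intro dA dB hk hnd hv
    simp only [List.foldl_cons]
    set c := pvFirst w with hc
    have hcontains : dA.contains c = dB.contains c := by
      rw [PySem.Dict.contains_eq_decide_mem_keys, PySem.Dict.contains_eq_decide_mem_keys, hk]
    -- the base getD at c is unchanged by A's conditional insert of []
    have hbaseA : (if dA.contains c then dA else dA.insert c ([] : List String)).getD c []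
        = dA.getD c [] := by
      by_cases h : dA.contains c = true
      · simp [h]
      · have h' : dA.contains c = false := by simp [h]
        simp [h', PySem.Dict.getD_insert_self, PySem.Dict.getD_of_not_contains dA [] h']
    have hstepA_keys : (pvStepA dA w).keys = (pvStepB dB w).keys := by
      unfold pvStepA pvStepB
      by_cases h : dA.contains c = true
      · have hB : dB.contains c = true := hcontains ▸ h
        simp only [← hc, h, if_pos]
        rw [PySem.Dict.keys_modify, PySem.Dict.keys_insert_of_contains dA _ h,
          PySem.Dict.keys_insert_of_contains dB _ hB, hk]
      · have h' : dA.contains c = false := by simp [h]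
        have hB : dB.contains c = false := hcontains ▸ h'
        simp only [← hc, h', Bool.false_eq_true, if_false]
        rw [PySem.Dict.keys_modify,
          PySem.Dict.keys_insert_of_contains _ _ (PySem.Dict.contains_insert_self dA c []),
          PySem.Dict.keys_insert_of_not_contains dA _ h',
          PySem.Dict.keys_insert_of_not_contains dB _ hB, hk]
    have hstepB_nodup : (pvStepB dB w).keys.Nodup :=
      PySem.Dict.nodup_keys_insert dB _ _ hnd
    have hstepVal : ∀ c', (pvStepB dB w).getD c' true
        = pvAllEvenLoop ((pvStepA dA w).getD c' []) := by
      intro c'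
      by_cases hcc : c' = c
      · subst hcc
        unfold pvStepA pvStepB
        rw [PySem.Dict.getD_insert_self, PySem.Dict.getD_modify_self, hbaseA,
          pvAllEvenLoop_append, hv c]
      · unfold pvStepA pvStepB
        rw [PySem.Dict.getD_insert_of_ne _ _ _ hcc, PySem.Dict.getD_modify_of_ne _ _ _ hcc]
        by_cases h : dA.contains c = true
        · simp only [← hc, h, if_pos]; exact hv c'
        · have h' : dA.contains c = false := by simp [h]
          simp only [← hc, h', Bool.false_eq_true, if_false]
          rw [PySem.Dict.getD_insert_of_ne _ _ _ hcc]
          exact hv c'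
    exact ih (pvStepA dA w) (pvStepB dB w) hstepA_keys hstepB_nodup hstepVal

-- ===== VERDICT (by name: the statement is the Claim_ definition above) =====
theorem get_winning_letters_spec : Claim_equal_get_winning_letters := by
  intro words _ _
  unfold Spec_get_winning_letters get_winning_letters get_winning_letters_alt
  show (List.foldl pvStepA PySem.Dict.empty words).keys.foldl
      (fun s c => if pvAllEvenLoop ((List.foldl pvStepA PySem.Dict.empty words).getD c []) then
        PySem.Set.add s (String.ofList [c]) else s) [] =
    (List.foldl pvStepB PySem.Dict.empty words).items.foldl
      (fun s p => if p.2 then PySem.Set.add s (String.ofList [p.1]) else s) []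
  obtain ⟨hk, hnd, hv⟩ := pvInvariant words PySem.Dict.empty PySem.Dict.empty
    (by rw [PySem.Dict.keys_empty, PySem.Dict.keys_empty])
    PySem.Dict.nodup_keys_empty
    (by intro c; rw [PySem.Dict.getD_empty, PySem.Dict.getD_empty]; rfl)
  set freq := words.foldl pvStepA PySem.Dict.empty with hfreq
  set flags := words.foldl pvStepB PySem.Dict.empty with hflags
  rw [PySem.Dict.items_eq_map_keys flags hnd true, List.foldl_map, ← hk]
  exact (PySem.List.foldl_congr_mem freq.keys _ _ _
    (fun acc c _ => by rw [hv c])).symm
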